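-- pv_equiv track=rewrite | github.com/thehalvo/homeostasis | modules/patch_generation/iterative_refiner.py | _categorize_feedback
-- ===== SOURCE A (Python) =====
-- from typing import Dict, List, Optional, Any
--
-- def _categorize_feedback(feedback_items: List[str]) -> str:
--     """Categorize feedback items for pattern learning."""
--     categories = {
--         'test_focused': any('test' in item.lower() for item in feedback_items),
--         'style_focused': any('style' in item.lower() for item in feedback_items),
--         'error_focused': any('error' in item.lower() or 'exception' in item.lower() for item in feedback_items),
--         'semantic_focused': any('semantic' in item.lower() or 'logic' in item.lower() for item in feedback_items)
--     }
--
--     # Return the primary category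
--     for category, present in categories.items():
--         if present:
--             return category
--
--     return 'general'
-- ===== SOURCE B (Python) =====
-- from typing import List
--
-- _PRIORITY = ['test_focused', 'style_focused', 'error_focused', 'semantic_focused']
--
-- def _categorize_feedback(feedback_items: List[str]) -> str:
--     """Categorize feedback items for pattern learning (single pass + priority lookup)."""
--     found = set()
--     for item in feedback_items:
--         low = item.lower()
--         if 'test' in low:
--             found.add('test_focused')
--         if 'style' in low:
--             found.add('style_focused')
--         if 'error' in low or 'exception' in low:
--             found.add('error_focused')
--         if 'semantic' in low or 'logic' in low:
--             found.add('semantic_focused')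
--     for cat in _PRIORITY:
--         if cat in found:
--             return cat
--     return 'general'
-- ===== Notes on version B (the rewrite author's own statement) =====
-- stated objective: faster
-- what changed: A scans the whole list four times (one any() generator per category) and then walks a per-call dict; B makes one pass over the items collecting matched category names into a set and returns the first of the fixed priority list present in the set.
import Mathlib
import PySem

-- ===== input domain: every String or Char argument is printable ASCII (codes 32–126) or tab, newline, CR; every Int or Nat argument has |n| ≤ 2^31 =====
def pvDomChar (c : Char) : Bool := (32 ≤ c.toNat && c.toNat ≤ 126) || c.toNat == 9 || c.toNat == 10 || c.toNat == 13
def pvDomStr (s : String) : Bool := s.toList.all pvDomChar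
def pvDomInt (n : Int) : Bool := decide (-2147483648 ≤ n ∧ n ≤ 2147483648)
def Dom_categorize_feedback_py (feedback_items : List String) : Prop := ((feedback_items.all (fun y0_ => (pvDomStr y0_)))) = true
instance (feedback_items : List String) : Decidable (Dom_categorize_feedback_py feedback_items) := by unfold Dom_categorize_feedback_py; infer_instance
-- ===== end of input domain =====

-- B replaces A's four separate any()-scans of the list (one per category) by one pass that
-- collects matched category names into a set, then a first-hit walk of the fixed priority list.

-- ===== PORT A =====
-- the for-loop over categories.items() with early return
def pvLoopA : List (String × Bool) → String
  | [] => "general"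
  | (category, present) :: rest => if present then category else pvLoopA rest

def categorize_feedback_py (feedback_items : List String) : String :=
  let categories : PySem.Dict String Bool :=
    PySem.Dict.ofList
      [ ("test_focused", feedback_items.any (fun item => PySem.Str.isIn "test" (PySem.Str.lower item)))
      , ("style_focused", feedback_items.any (fun item => PySem.Str.isIn "style" (PySem.Str.lower item)))
      , ("error_focused", feedback_items.any (fun item =>
          PySem.Str.isIn "error" (PySem.Str.lower item) || PySem.Str.isIn "exception" (PySem.Str.lower item)))
      , ("semantic_focused", feedback_items.any (fun item =>
          PySem.Str.isIn "semantic" (PySem.Str.lower item) || PySem.Str.isIn "logic" (PySem.Str.lower item))) ]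
  pvLoopA categories.items

-- ===== PORT B =====
-- one pass: add this item's matched category names to the set
def pvFlagsOf (s : PySem.Set String) (item : String) : PySem.Set String :=
  let low := PySem.Str.lower item
  let s := if PySem.Str.isIn "test" low then s.add "test_focused" else s
  let s := if PySem.Str.isIn "style" low then s.add "style_focused" else s
  let s := if PySem.Str.isIn "error" low || PySem.Str.isIn "exception" low then s.add "error_focused" else s
  if PySem.Str.isIn "semantic" low || PySem.Str.isIn "logic" low then s.add "semantic_focused" else s

-- first category of the priority list present in the set
def pvPickB : List String → PySem.Set String → String
  | [], _ => "general"
  | cat :: rest, found => if found.contains cat then cat else pvPickB rest found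

def categorize_feedback_py_alt (feedback_items : List String) : String :=
  let found := feedback_items.foldl pvFlagsOf PySem.Set.empty
  pvPickB ["test_focused", "style_focused", "error_focused", "semantic_focused"] found

-- ===== PRECONDITION & SPEC =====
def Spec_categorize_feedback_py (feedback_items : List String) (out : String) : Prop := out = categorize_feedback_py_alt feedback_items
instance (feedback_items : List String) (out : String) : Decidable (Spec_categorize_feedback_py feedback_items out) := by unfold Spec_categorize_feedback_py; infer_instance

-- ===== CLAIM (what is proved, stated in full; the proofs are below) =====
def Claim_equal_categorize_feedback_py : Prop := ∀ (feedback_items : List String), Dom_categorize_feedback_py feedback_items → Spec_categorize_feedback_py feedback_items (categorize_feedback_py feedback_items)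

-- ===== LEMMAS AND PROOFS =====

theorem mem_foldl_test (fs : List String) (s : PySem.Set String) :
    "test_focused" ∈ fs.foldl pvFlagsOf s ↔
      "test_focused" ∈ s ∨ fs.any (fun item => PySem.Str.isIn "test" (PySem.Str.lower item)) = true := by
  induction fs generalizing s with
  | nil => simp
  | cons a t ih =>
    simp only [List.foldl_cons, List.any_cons, Bool.or_eq_true, ih]
    simp only [pvFlagsOf]
    generalize PySem.Str.isIn "test" (PySem.Str.lower a) = b1
    generalize PySem.Str.isIn "style" (PySem.Str.lower a) = b2
    generalize PySem.Str.isIn "error" (PySem.Str.lower a) = b3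
    generalize PySem.Str.isIn "exception" (PySem.Str.lower a) = b4
    generalize PySem.Str.isIn "semantic" (PySem.Str.lower a) = b5
    generalize PySem.Str.isIn "logic" (PySem.Str.lower a) = b6
    generalize List.any t (fun item => PySem.Str.isIn "test" (PySem.Str.lower item)) = bt
    split_ifs
    all_goals try simp only [Bool.or_eq_true] at *
    all_goals try simp [PySem.Set.mem_add]
    all_goals tauto

theorem contains_foldl_test (fs : List String) (s : PySem.Set String) :
    (fs.foldl pvFlagsOf s).contains "test_focused" =
      (s.contains "test_focused" || fs.any (fun item => PySem.Str.isIn "test" (PySem.Str.lower item))) := by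
  rw [Bool.eq_iff_iff]
  simp only [PySem.Set.contains_iff, Bool.or_eq_true]
  exact mem_foldl_test fs s

theorem mem_foldl_style (fs : List String) (s : PySem.Set String) :
    "style_focused" ∈ fs.foldl pvFlagsOf s ↔
      "style_focused" ∈ s ∨ fs.any (fun item => PySem.Str.isIn "style" (PySem.Str.lower item)) = true := by
  induction fs generalizing s with
  | nil => simp
  | cons a t ih =>
    simp only [List.foldl_cons, List.any_cons, Bool.or_eq_true, ih]
    simp only [pvFlagsOf]
    generalize PySem.Str.isIn "test" (PySem.Str.lower a) = b1
    generalize PySem.Str.isIn "style" (PySem.Str.lower a) = b2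
    generalize PySem.Str.isIn "error" (PySem.Str.lower a) = b3
    generalize PySem.Str.isIn "exception" (PySem.Str.lower a) = b4
    generalize PySem.Str.isIn "semantic" (PySem.Str.lower a) = b5
    generalize PySem.Str.isIn "logic" (PySem.Str.lower a) = b6
    generalize List.any t (fun item => PySem.Str.isIn "style" (PySem.Str.lower item)) = bt
    split_ifs
    all_goals try simp only [Bool.or_eq_true] at *
    all_goals try simp [PySem.Set.mem_add]
    all_goals tauto

theorem contains_foldl_style (fs : List String) (s : PySem.Set String) :
    (fs.foldl pvFlagsOf s).contains "style_focused" =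
      (s.contains "style_focused" || fs.any (fun item => PySem.Str.isIn "style" (PySem.Str.lower item))) := by
  rw [Bool.eq_iff_iff]
  simp only [PySem.Set.contains_iff, Bool.or_eq_true]
  exact mem_foldl_style fs s

theorem mem_foldl_error (fs : List String) (s : PySem.Set String) :
    "error_focused" ∈ fs.foldl pvFlagsOf s ↔
      "error_focused" ∈ s ∨ fs.any (fun item => PySem.Str.isIn "error" (PySem.Str.lower item) || PySem.Str.isIn "exception" (PySem.Str.lower item)) = true := by
  induction fs generalizing s with
  | nil => simp
  | cons a t ih =>
    simp only [List.foldl_cons, List.any_cons, Bool.or_eq_true, ih]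
    simp only [pvFlagsOf]
    generalize PySem.Str.isIn "test" (PySem.Str.lower a) = b1
    generalize PySem.Str.isIn "style" (PySem.Str.lower a) = b2
    generalize PySem.Str.isIn "error" (PySem.Str.lower a) = b3
    generalize PySem.Str.isIn "exception" (PySem.Str.lower a) = b4
    generalize PySem.Str.isIn "semantic" (PySem.Str.lower a) = b5
    generalize PySem.Str.isIn "logic" (PySem.Str.lower a) = b6
    generalize List.any t (fun item => PySem.Str.isIn "error" (PySem.Str.lower item) || PySem.Str.isIn "exception" (PySem.Str.lower item)) = bt
    split_ifs
    all_goals try simp only [Bool.or_eq_true] at *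
    all_goals try simp [PySem.Set.mem_add]
    all_goals tauto

theorem contains_foldl_error (fs : List String) (s : PySem.Set String) :
    (fs.foldl pvFlagsOf s).contains "error_focused" =
      (s.contains "error_focused" || fs.any (fun item => PySem.Str.isIn "error" (PySem.Str.lower item) || PySem.Str.isIn "exception" (PySem.Str.lower item))) := by
  rw [Bool.eq_iff_iff]
  simp only [PySem.Set.contains_iff, Bool.or_eq_true]
  exact mem_foldl_error fs s

theorem mem_foldl_semantic (fs : List String) (s : PySem.Set String) :
    "semantic_focused" ∈ fs.foldl pvFlagsOf s ↔
      "semantic_focused" ∈ s ∨ fs.any (fun item => PySem.Str.isIn "semantic" (PySem.Str.lower item) || PySem.Str.isIn "logic" (PySem.Str.lower item)) = true := by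
  induction fs generalizing s with
  | nil => simp
  | cons a t ih =>
    simp only [List.foldl_cons, List.any_cons, Bool.or_eq_true, ih]
    simp only [pvFlagsOf]
    generalize PySem.Str.isIn "test" (PySem.Str.lower a) = b1
    generalize PySem.Str.isIn "style" (PySem.Str.lower a) = b2
    generalize PySem.Str.isIn "error" (PySem.Str.lower a) = b3
    generalize PySem.Str.isIn "exception" (PySem.Str.lower a) = b4
    generalize PySem.Str.isIn "semantic" (PySem.Str.lower a) = b5
    generalize PySem.Str.isIn "logic" (PySem.Str.lower a) = b6
    generalize List.any t (fun item => PySem.Str.isIn "semantic" (PySem.Str.lower item) || PySem.Str.isIn "logic" (PySem.Str.lower item)) = bt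
    split_ifs
    all_goals try simp only [Bool.or_eq_true] at *
    all_goals try simp [PySem.Set.mem_add]
    all_goals tauto

theorem contains_foldl_semantic (fs : List String) (s : PySem.Set String) :
    (fs.foldl pvFlagsOf s).contains "semantic_focused" =
      (s.contains "semantic_focused" || fs.any (fun item => PySem.Str.isIn "semantic" (PySem.Str.lower item) || PySem.Str.isIn "logic" (PySem.Str.lower item))) := by
  rw [Bool.eq_iff_iff]
  simp only [PySem.Set.contains_iff, Bool.or_eq_true]
  exact mem_foldl_semantic fs s

-- ===== VERDICT (by name: the statement is the Claim_ definition above) =====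
theorem categorize_feedback_py_spec : Claim_equal_categorize_feedback_py := by
  intro fs _
  unfold Spec_categorize_feedback_py categorize_feedback_py categorize_feedback_py_alt
  simp only [pvPickB, contains_foldl_test, contains_foldl_style, contains_foldl_error,
    contains_foldl_semantic]
  generalize List.any fs (fun item => PySem.Str.isIn "test" (PySem.Str.lower item)) = c1
  generalize List.any fs (fun item => PySem.Str.isIn "style" (PySem.Str.lower item)) = c2
  generalize List.any fs (fun item => PySem.Str.isIn "error" (PySem.Str.lower item) || PySem.Str.isIn "exception" (PySem.Str.lower item)) = c3
  generalize List.any fs (fun item => PySem.Str.isIn "semantic" (PySem.Str.lower item) || PySem.Str.isIn "logic" (PySem.Str.lower item)) = c4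
  cases c1 <;> cases c2 <;> cases c3 <;> cases c4 <;> decide
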